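-- pv_equiv track=rewrite | github.com/Enolaton/study | 프로그래머스/1/12915. 문자열 내 마음대로 정렬하기/문자열 내 마음대로 정렬하기.py | solution
-- ===== SOURCE A (Python) =====
-- def solution(strings, n):
--     answer = []
--     c_list = [] # 인덱스 문자를 담을 리스트
--     s_list = [] # 인덱스 문자로 비교한 순서를 strings와 매칭하여 담을 리스트
--
--     for s in strings:
--         c_list.append(s[n])
--     for s_out in zip(c_list, strings):
--         s_list.append(s_out)
--     s_list = sorted(s_list)
--     for i in range(len(s_list)):
--         answer.append(s_list[i][1])
--     return answer
-- ===== SOURCE B (Python) =====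
-- def solution(strings, n):
--     # Two sequential stable sorts instead of decorate-sort-undecorate:
--     # sort lexicographically first, then stably by the nth character.
--     ordered = sorted(strings)
--     return sorted(ordered, key=lambda x: x[n])
-- ===== Notes on version B (the rewrite author's own statement) =====
-- stated objective: simpler
-- what changed: Replaces the decorate-sort-undecorate pipeline (build char list, zip into pairs, sort pairs, extract) with two sequential stable sorts: a full lexicographic sort followed by a stable sort on the nth character, whose stability reproduces the (s[n], s) tuple order.
import Mathlib
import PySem

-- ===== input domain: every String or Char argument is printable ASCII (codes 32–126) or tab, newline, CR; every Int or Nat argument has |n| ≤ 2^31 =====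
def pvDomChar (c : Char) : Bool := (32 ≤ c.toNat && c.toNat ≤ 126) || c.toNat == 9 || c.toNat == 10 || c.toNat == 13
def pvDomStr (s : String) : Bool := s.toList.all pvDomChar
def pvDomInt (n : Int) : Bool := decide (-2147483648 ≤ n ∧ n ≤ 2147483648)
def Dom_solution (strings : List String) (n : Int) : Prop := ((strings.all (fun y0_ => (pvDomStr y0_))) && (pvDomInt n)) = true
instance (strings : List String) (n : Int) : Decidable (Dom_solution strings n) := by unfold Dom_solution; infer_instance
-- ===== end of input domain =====

-- B replaces A's decorate-sort-undecorate with two sequential stable sorts (lexicographic pass, then a stable sort by the nth character).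


-- ===== PORT A =====
def solution (strings : List String) (n : Int) : List String :=
  let c_list := strings.foldl (fun acc s => acc ++ [(PySem.Str.pyGet? s n).getD ' ']) []
  let s_list := (c_list.zip strings).foldl (fun acc s_out => acc ++ [s_out]) []
  let s_list := PySem.List.sorted2 s_list Prod.fst Prod.snd false
  (PySem.List.pyRange 0 (PySem.List.len s_list)).foldl
    (fun acc i => acc ++ [(PySem.List.pyGetD s_list i (' ', "")).2]) []

-- ===== PORT B =====
def solution_alt (strings : List String) (n : Int) : List String :=
  let ordered := PySem.List.sorted strings (fun x => x) false
  PySem.List.sorted ordered (fun x => (PySem.Str.pyGet? x n).getD ' ') false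

-- ===== PRECONDITION & SPEC =====
-- Pre_ excludes exactly the inputs where both Pythons raise IndexError at s[n]: some string has no nth character.
def Pre_solution (strings : List String) (n : Int) : Prop :=
  ∀ s ∈ strings, -(PySem.Str.len s) ≤ n ∧ n < PySem.Str.len s
instance (strings : List String) (n : Int) : Decidable (Pre_solution strings n) := by unfold Pre_solution; infer_instance
def pvWitness_solution : List String × Int := (["sun", "bed", "car"], 1)

def Spec_solution (strings : List String) (n : Int) (out : List String) : Prop := out = solution_alt strings n
instance (strings : List String) (n : Int) (out : List String) : Decidable (Spec_solution strings n out) := by unfold Spec_solution; infer_instance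

-- ===== CLAIM (what is proved, stated in full; the proofs are below) =====
def Claim_equal_solution : Prop := ∀ (strings : List String) (n : Int), Dom_solution strings n → Pre_solution strings n → Spec_solution strings n (solution strings n)

-- ===== LEMMAS AND PROOFS =====

-- the nth-character key both programs sort by
def pvKey (n : Int) (s : String) : Char := (PySem.Str.pyGet? s n).getD ' '

-- the combined (nth char, string) sort key, as a lexicographically ordered pair
def pvLexKey (n : Int) (s : String) : Lex (Char × String) := toLex (pvKey n s, s)

lemma pvLexKey_injective (n : Int) : Function.Injective (pvLexKey n) := by
  intro a b h
  have := congrArg (fun p => (ofLex p).2) h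
  simpa [pvLexKey] using this

-- one insertion step of the key-sort keeps the (key, element)-lexicographic order,
-- provided the inserted element is ≥ everything already placed
lemma pvInsert_pairwise {α κ : Type} [LinearOrder α] [LinearOrder κ] (k : α → κ) (x : α) (acc : List α)
    (hp : acc.Pairwise (fun a b => k a < k b ∨ (k a = k b ∧ a ≤ b)))
    (hle : ∀ y ∈ acc, y ≤ x) :
    (PySem.List.insertBy (fun a b => decide (k a < k b)) x acc).Pairwise
      (fun a b => k a < k b ∨ (k a = k b ∧ a ≤ b)) := by
  induction acc with
  | nil => simp [PySem.List.insertBy]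
  | cons y ys ih =>
    simp only [PySem.List.insertBy]
    by_cases h : k x < k y
    · simp only [h, decide_true, if_true]
      refine List.Pairwise.cons ?_ hp
      intro z hz
      rcases List.mem_cons.mp hz with rfl | hz
      · exact Or.inl h
      · rcases (List.pairwise_cons.mp hp).1 z hz with h2 | ⟨h2, _⟩
        · exact Or.inl (h.trans h2)
        · exact Or.inl (h2 ▸ h)
    · simp only [h, decide_false, if_false, Bool.false_eq_true]
      refine List.Pairwise.cons ?_ (ih (List.pairwise_cons.mp hp).2 (fun z hz => hle z (List.mem_cons_of_mem _ hz)))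
      intro z hz
      rcases (PySem.List.mem_insertBy _ _ _ _).mp hz with rfl | hz
      · rcases eq_or_lt_of_le (not_lt.mp h) with h2 | h2
        · exact Or.inr ⟨h2, hle y (List.mem_cons_self)⟩
        · exact Or.inl h2
      · exact (List.pairwise_cons.mp hp).1 z hz

lemma pvFoldl_pairwise {α κ : Type} [LinearOrder α] [LinearOrder κ] (k : α → κ) (xs acc : List α)
    (hx : xs.Pairwise (· ≤ ·))
    (hp : acc.Pairwise (fun a b => k a < k b ∨ (k a = k b ∧ a ≤ b)))
    (hcross : ∀ y ∈ acc, ∀ x ∈ xs, y ≤ x) :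
    (xs.foldl (fun acc x => PySem.List.insertBy (fun a b => decide (k a < k b)) x acc) acc).Pairwise
      (fun a b => k a < k b ∨ (k a = k b ∧ a ≤ b)) := by
  induction xs generalizing acc with
  | nil => exact hp
  | cons x xs ih =>
    refine ih _ (List.pairwise_cons.mp hx).2
      (pvInsert_pairwise k x acc hp (fun y hy => hcross y hy x List.mem_cons_self)) ?_
    intro y hy z hz
    rcases (PySem.List.mem_insertBy _ _ _ _).mp hy with rfl | hy
    · exact (List.pairwise_cons.mp hx).1 z hz
    · exact hcross y hy z (List.mem_cons_of_mem _ hz)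

-- STABILITY: sorting an already ≤-sorted list by a key yields the (key, element)-lexicographic order
lemma sorted_stable_pairwise {α κ : Type} [LinearOrder α] [LinearOrder κ]
    (xs : List α) (k : α → κ) (h : xs.Pairwise (· ≤ ·)) :
    (PySem.List.sorted xs k false).Pairwise (fun a b => k a < k b ∨ (k a = k b ∧ a ≤ b)) := by
  rw [PySem.List.sorted_eq_foldl_insertBy]
  exact pvFoldl_pairwise k xs [] h (by simp) (by simp)

lemma pvZip (n : Int) (strings : List String) :
    (strings.map (fun s => pvKey n s)).zip strings = strings.map (fun s => (pvKey n s, s)) := by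
  induction strings with
  | nil => rfl
  | cons s t ih => simp [ih]

-- Python's tuple sort sorted2 is the single sort by the lexicographic pair key
lemma sorted2_eq_sorted_lex {α κ₁ κ₂ : Type} [LinearOrder κ₁] [LinearOrder κ₂]
    (xs : List α) (k1 : α → κ₁) (k2 : α → κ₂) :
    PySem.List.sorted2 xs k1 k2 false = PySem.List.sorted xs (fun x => toLex (k1 x, k2 x)) false := by
  unfold PySem.List.sorted2 PySem.List.sorted
  simp only [Bool.false_eq_true, if_false]
  congr 1
  funext acc x
  congr 1
  funext a b
  rcases lt_trichotomy (k1 a) (k1 b) with h | h | h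
  · simp [Prod.Lex.lt_iff, h]
  · simp [Prod.Lex.lt_iff, h]
  · simp [Prod.Lex.lt_iff, h, not_lt.mpr (le_of_lt h), h.ne']

lemma solution_eq_map_snd (strings : List String) (n : Int) :
    solution strings n =
      (PySem.List.sorted (strings.map (fun s => (pvKey n s, s)))
        (fun p => toLex (p.1, p.2)) false).map Prod.snd := by
  show ((PySem.List.pyRange 0 _ 1).foldl _ []) = _
  rw [PySem.List.foldl_pyRange_zero_pyGetD _ (' ', "") (fun acc v => acc ++ [v.2]) []]
  simp only [PySem.List.foldl_append_singleton_eq_map, List.nil_append, List.map_id']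
  rw [show (fun s => (PySem.Str.pyGet? s n).getD ' ') = pvKey n from rfl, pvZip, sorted2_eq_sorted_lex]

lemma solution_perm (strings : List String) (n : Int) :
    (solution strings n).Perm strings := by
  rw [solution_eq_map_snd]
  have h := (PySem.List.sorted_perm (strings.map (fun s => (pvKey n s, s))) (fun p => toLex (p.1, p.2)) false).map Prod.snd
  simpa [Function.comp_def] using h

lemma solution_pairwise (strings : List String) (n : Int) :
    (solution strings n).Pairwise (fun a b => pvLexKey n a ≤ pvLexKey n b) := by
  rw [solution_eq_map_snd, List.pairwise_map]
  have h := PySem.List.sorted_pairwise (strings.map (fun s => (pvKey n s, s))) (fun p => toLex (p.1, p.2))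
  refine h.imp_of_mem ?_
  intro p q hp hq hr
  have hp' := (PySem.List.mem_sorted _ _ _ _).mp hp
  have hq' := (PySem.List.mem_sorted _ _ _ _).mp hq
  obtain ⟨a, -, rfl⟩ := List.mem_map.mp hp'
  obtain ⟨b, -, rfl⟩ := List.mem_map.mp hq'
  exact hr

lemma solution_alt_perm (strings : List String) (n : Int) :
    (solution_alt strings n).Perm strings := by
  exact (PySem.List.sorted_perm _ _ _).trans (PySem.List.sorted_perm _ _ _)

lemma solution_alt_pairwise (strings : List String) (n : Int) :
    (solution_alt strings n).Pairwise (fun a b => pvLexKey n a ≤ pvLexKey n b) := by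
  have hord : (PySem.List.sorted strings (fun x => x) false).Pairwise (· ≤ ·) :=
    PySem.List.sorted_pairwise strings (fun x => x)
  have h := sorted_stable_pairwise (PySem.List.sorted strings (fun x => x) false) (pvKey n) hord
  refine h.imp ?_
  intro a b hr
  show toLex (pvKey n a, a) ≤ toLex (pvKey n b, b)
  rw [Prod.Lex.le_iff]
  exact hr

-- ===== VERDICT (by name: the statement is the Claim_ definition above) =====
theorem solution_spec : Claim_equal_solution := by
  intro strings n _ _
  show solution strings n = solution_alt strings n
  exact PySem.List.eq_of_perm_of_pairwise_le_of_injective (pvLexKey n) (pvLexKey_injective n)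
    ((solution_perm strings n).trans (solution_alt_perm strings n).symm)
    (solution_pairwise strings n) (solution_alt_pairwise strings n)
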